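-- pv_equiv track=rewrite | github.com/wzygxr/shuati | class135_GameTheoryAlgorithms/Code21_PredictTheWinnerLeetCode486.py | predictTheWinnerMemo
-- ===== SOURCE A (Python) =====
-- from typing import List
--
-- def predictTheWinnerMemo(nums: List[int]) -> bool:
--     """
--     递归+记忆化搜索版本
--     时间复杂度：O(n^2)，空间复杂度：O(n^2)
--     """
--     if not nums:
--         return True
--
--     n = len(nums)
--     # 使用-1作为未计算的标记，避免None类型问题
--     memo = [[-10**9] * n for _ in range(n)]
--
--     def dfs(i: int, j: int) -> int:
--         # 边界条件：当i > j时，没有分数可拿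
--         if i > j:
--             return 0
--
--         # 检查记忆化数组（使用-10**9作为未计算标记）
--         if memo[i][j] != -10**9:
--             return memo[i][j]
--
--         # 当前玩家可以选择拿左边或右边的分数
--         take_left = nums[i] - dfs(i + 1, j)
--         take_right = nums[j] - dfs(i, j - 1)
--
--         # 选择最优策略
--         memo[i][j] = max(take_left, take_right)
--         return memo[i][j]
--
--     return dfs(0, n - 1) >= 0
-- ===== SOURCE B (Python) =====
-- def predictTheWinnerMemo(nums):
--     """Iterative bottom-up DP with a rolling 1D array (same O(n^2) time, O(n) space)."""
--     n = len(nums)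
--     if n == 0:
--         return True
--     dp = [0] * n
--     for i in range(n - 1, -1, -1):
--         dp[i] = nums[i]
--         for j in range(i + 1, n):
--             dp[j] = max(nums[i] - dp[j], nums[j] - dp[j - 1])
--     return dp[n - 1] >= 0
-- ===== Notes on version B (the rewrite author's own statement) =====
-- stated objective: faster
-- what changed: Replaces the recursive memoized search (closure + n x n sentinel-initialised memo table) by an iterative bottom-up DP over a rolling 1D array of score differences.
import Mathlib
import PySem

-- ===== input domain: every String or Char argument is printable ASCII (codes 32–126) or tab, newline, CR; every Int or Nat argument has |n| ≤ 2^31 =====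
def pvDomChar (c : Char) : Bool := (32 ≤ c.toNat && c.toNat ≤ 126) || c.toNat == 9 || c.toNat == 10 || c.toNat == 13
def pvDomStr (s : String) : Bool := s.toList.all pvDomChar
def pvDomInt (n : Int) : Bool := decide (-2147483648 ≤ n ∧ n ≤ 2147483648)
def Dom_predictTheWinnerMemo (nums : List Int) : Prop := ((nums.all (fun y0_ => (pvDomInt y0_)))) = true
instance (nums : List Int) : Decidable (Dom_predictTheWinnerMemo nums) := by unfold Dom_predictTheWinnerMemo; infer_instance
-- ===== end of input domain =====

-- B changes the decomposition: iterative bottom-up DP over a rolling 1D array instead of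
-- recursive memoized search with an n×n sentinel-initialised table. Return value only; A mutates no argument.

-- ===== PORT A =====
-- A's `memo`, a 2D list filled with -10**9, is modelled exactly by a Dict keyed by (i, j)
-- whose getD default is -10**9 (unset entry = sentinel); the closure's mutation becomes state passing.
-- nums[i] is read via (pyGet? …).getD 0: every read dfs performs has 0 ≤ i ≤ j < len(nums), so it is exact there.
def dfsA (nums : List Int) (memo : PySem.Dict (Int × Int) Int) (i j : Int) :
    Int × PySem.Dict (Int × Int) Int :=
  if i > j then (0, memo)
  else
    let c := memo.getD (i, j) (-1000000000)
    if c ≠ -1000000000 then (c, memo)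
    else
      let l := dfsA nums memo (i + 1) j
      let take_left := (PySem.List.pyGet? nums i).getD 0 - l.1
      let r := dfsA nums l.2 i (j - 1)
      let take_right := (PySem.List.pyGet? nums j).getD 0 - r.1
      let v := max take_left take_right
      (v, r.2.insert (i, j) v)
termination_by (j + 1 - i).toNat
decreasing_by all_goals omega

def predictTheWinnerMemo (nums : List Int) : Bool :=
  if nums = [] then true
  else
    let n : Int := nums.length
    decide ((dfsA nums PySem.Dict.empty 0 (n - 1)).1 ≥ 0)

-- ===== PORT B =====
-- inner `for j in range(i+1, n)` over List.range' (i+1) (n-(i+1)); indices are in range, so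
-- nums[j] is nums.getD j 0 and dp[j] = … is List.set, all exact here.
def predictTheWinnerMemo_alt (nums : List Int) : Bool :=
  let n := nums.length
  if n = 0 then true
  else
    let dp := (List.range n).reverse.foldl
      (fun dp i =>
        let dp := dp.set i (nums.getD i 0)
        (List.range' (i + 1) (n - (i + 1))).foldl
          (fun dp j =>
            dp.set j (max (nums.getD i 0 - dp.getD j 0) (nums.getD j 0 - dp.getD (j - 1) 0)))
          dp)
      (List.replicate n (0 : Int))
    decide (dp.getD (n - 1) 0 ≥ 0)

-- ===== PRECONDITION & SPEC =====
def Spec_predictTheWinnerMemo (nums : List Int) (out : Bool) : Prop := out = predictTheWinnerMemo_alt nums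
instance (nums : List Int) (out : Bool) : Decidable (Spec_predictTheWinnerMemo nums out) := by unfold Spec_predictTheWinnerMemo; infer_instance

-- ===== CLAIM (what is proved, stated in full; the proofs are below) =====
def Claim_equal_predictTheWinnerMemo : Prop := ∀ (nums : List Int), Dom_predictTheWinnerMemo nums → Spec_predictTheWinnerMemo nums (predictTheWinnerMemo nums)

-- ===== LEMMAS AND PROOFS =====

-- Reference value: the optimal score difference on nums[i..j] (pure form of A's dfs).
def pureD (nums : List Int) (i j : Int) : Int :=
  if i > j then 0
  else max ((PySem.List.pyGet? nums i).getD 0 - pureD nums (i + 1) j)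
           ((PySem.List.pyGet? nums j).getD 0 - pureD nums i (j - 1))
termination_by (j + 1 - i).toNat
decreasing_by all_goals omega

def InvA (nums : List Int) (memo : PySem.Dict (Int × Int) Int) : Prop :=
  ∀ i j v, memo.get? (i, j) = some v → v ≠ -1000000000 → v = pureD nums i j

theorem dfsA_correct (nums : List Int) (memo : PySem.Dict (Int × Int) Int) (i j : Int)
    (hinv : InvA nums memo) :
    (dfsA nums memo i j).1 = pureD nums i j ∧ InvA nums (dfsA nums memo i j).2 := by
  fun_induction dfsA nums memo i j with
  | case1 memo i j h =>
      constructor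
      · rw [pureD]; simp [h]
      · exact hinv
  | case2 memo i j h c hc =>
      refine ⟨?_, hinv⟩
      show c = pureD nums i j
      rcases hget : memo.get? (i, j) with _ | v
      · exfalso; apply hc
        show memo.getD (i, j) (-1000000000) = -1000000000
        rw [PySem.Dict.getD_eq_get?_getD, hget]; rfl
      · have hcv : c = v := by
          show memo.getD (i, j) (-1000000000) = v
          rw [PySem.Dict.getD_eq_get?_getD, hget]; rfl
        rw [hcv]
        exact hinv i j v hget (by rw [← hcv]; exact hc)
  | case3 memo i j h c hc l tl r tr v ih1 ih2 =>
      obtain ⟨hl1, hl2⟩ := ih1 hinv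
      obtain ⟨hr1, hr2⟩ := ih2 hl2
      have hv : v = pureD nums i j := by
        show max tl tr = pureD nums i j
        rw [pureD]
        simp only [if_neg h]
        show max ((PySem.List.pyGet? nums i).getD 0 - l.1) ((PySem.List.pyGet? nums j).getD 0 - r.1) = _
        rw [show l.1 = pureD nums (i+1) j from hl1, show r.1 = pureD nums i (j-1) from hr1]
      refine ⟨hv, ?_⟩
      intro i' j' v' hget hne
      by_cases hk : (i', j') = ((i, j) : Int × Int)
      · rw [PySem.Dict.get?_insert, if_pos hk] at hget
        obtain ⟨rfl, rfl⟩ := Prod.mk.injEq .. ▸ hk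
        exact (Option.some.inj hget) ▸ hv
      · rw [PySem.Dict.get?_insert, if_neg hk] at hget
        exact hr2 i' j' v' hget hne

theorem setD_ne (dp : List Int) (s k : Nat) (x : Int) (h : k ≠ s) :
    (dp.set s x).getD k 0 = dp.getD k 0 := by
  simp [List.getD, Ne.symm h]

theorem setD_self (dp : List Int) (s : Nat) (x : Int) (h : s < dp.length) :
    (dp.set s x).getD s 0 = x := by
  simp [List.getD, h]

theorem pure_diag (nums : List Int) (i : Nat) :
    pureD nums (i:Int) (i:Int) = nums.getD i 0 := by
  rw [pureD]
  have h1 : pureD nums ((i:Int) + 1) i = 0 := by rw [pureD]; simp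
  have h2 : pureD nums (i:Int) ((i:Int) - 1) = 0 := by rw [pureD]; simp
  simp [h1, h2]

theorem pure_rec (nums : List Int) (i s : Nat) (h : i < s) :
    pureD nums (i:Int) (s:Int) =
      max (nums.getD i 0 - pureD nums ((i:Int) + 1) (s:Int))
          (nums.getD s 0 - pureD nums (i:Int) ((s:Int) - 1)) := by
  rw [pureD]
  have : ¬ ((i:Int) > (s:Int)) := by omega
  simp [this]

theorem innerB (nums : List Int) (n i : Nat) (hn : n = nums.length) (_hi : i < n) :
    ∀ (m s : Nat) (dp : List Int), dp.length = n → s + m = n → i + 1 ≤ s →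
    (∀ k, i ≤ k → k < s → dp.getD k 0 = pureD nums (i:Int) (k:Int)) →
    (∀ k, s ≤ k → k < n → dp.getD k 0 = pureD nums ((i:Int)+1) (k:Int)) →
    (((List.range' s m).foldl
        (fun dp j =>
          dp.set j (max (nums.getD i 0 - dp.getD j 0) (nums.getD j 0 - dp.getD (j - 1) 0)))
        dp).length = n ∧
      ∀ k, i ≤ k → k < n →
        ((List.range' s m).foldl
          (fun dp j =>
            dp.set j (max (nums.getD i 0 - dp.getD j 0) (nums.getD j 0 - dp.getD (j - 1) 0)))
          dp).getD k 0 = pureD nums (i:Int) (k:Int)) := by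
  intro m
  induction m with
  | zero =>
      intro s dp hlen hsm hs h1 h2
      simp only [List.range', List.foldl_nil]
      exact ⟨hlen, fun k hk1 hk2 => h1 k hk1 (by omega)⟩
  | succ m ih =>
      intro s dp hlen hsm hs h1 h2
      have hsn : s < n := by omega
      rw [List.range'_succ, List.foldl_cons]
      set x := max (nums.getD i 0 - dp.getD s 0) (nums.getD s 0 - dp.getD (s - 1) 0) with hx
      have hset : (dp.set s x).getD s 0 = x := setD_self dp s x (by omega)
      have hxval : x = pureD nums (i:Int) (s:Int) := by
        rw [hx, h2 s le_rfl hsn, h1 (s-1) (by omega) (by omega), pure_rec nums i s (by omega)]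
        have : ((s:Int) - 1) = ((s - 1 : Nat) : Int) := by omega
        rw [this]
      refine ih (s+1) (dp.set s x) (by simp [hlen]) (by omega) (by omega) ?_ ?_
      · intro k hk1 hk2
        by_cases hks : k = s
        · subst hks; rw [hset, hxval]
        · rw [setD_ne dp s k x hks]; exact h1 k hk1 (by omega)
      · intro k hk1 hk2
        rw [setD_ne dp s k x (by omega)]; exact h2 k (by omega) hk2

theorem rowStep (nums : List Int) (n i : Nat) (hn : n = nums.length) (hi : i < n)
    (dp : List Int) (hlen : dp.length = n)
    (hrow : ∀ k, i + 1 ≤ k → k < n → dp.getD k 0 = pureD nums ((i:Int)+1) (k:Int)) :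
    (((List.range' (i+1) (n-(i+1))).foldl
        (fun dp j =>
          dp.set j (max (nums.getD i 0 - dp.getD j 0) (nums.getD j 0 - dp.getD (j - 1) 0)))
        (dp.set i (nums.getD i 0))).length = n ∧
      ∀ k, i ≤ k → k < n →
        ((List.range' (i+1) (n-(i+1))).foldl
          (fun dp j =>
            dp.set j (max (nums.getD i 0 - dp.getD j 0) (nums.getD j 0 - dp.getD (j - 1) 0)))
          (dp.set i (nums.getD i 0))).getD k 0 = pureD nums (i:Int) (k:Int)) := by
  apply innerB nums n i hn hi (n-(i+1)) (i+1) _ (by simp [hlen]) (by omega) (by omega)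
  · intro k hk1 hk2
    have hks : k = i := by omega
    subst hks
    rw [setD_self dp k _ (by omega), pure_diag]
  · intro k hk1 hk2
    rw [setD_ne dp i k _ (by omega)]
    exact hrow k hk1 hk2

theorem outerB (nums : List Int) (n : Nat) (hn : n = nums.length) :
    ∀ (i : Nat), i < n → ∀ (dp : List Int), dp.length = n →
    (∀ k, i + 1 ≤ k → k < n → dp.getD k 0 = pureD nums ((i:Int)+1) (k:Int)) →
    ∀ j, j < n →
      ((List.range (i+1)).reverse.foldl
        (fun dp i =>
          (List.range' (i + 1) (n - (i + 1))).foldl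
            (fun dp j =>
              dp.set j (max (nums.getD i 0 - dp.getD j 0) (nums.getD j 0 - dp.getD (j - 1) 0)))
            (dp.set i (nums.getD i 0)))
        dp).getD j 0 = pureD nums 0 (j:Int) := by
  intro i
  induction i with
  | zero =>
      intro _ dp hlen hrow j hj
      have hr1 : (List.range (0+1)).reverse = [0] := by decide
      rw [hr1, List.foldl_cons, List.foldl_nil]
      have := (rowStep nums n 0 hn (by omega) dp hlen ?_).2 j (by omega) hj
      · exact_mod_cast this
      · intro k hk1 hk2; have := hrow k (by omega) hk2; exact_mod_cast this
  | succ i ih =>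
      intro hi dp hlen hrow j hj
      rw [List.range_succ, List.reverse_append]
      simp only [List.reverse_singleton, List.singleton_append, List.foldl_cons]
      obtain ⟨hl2, hr2⟩ := rowStep nums n (i+1) hn hi dp hlen (by exact_mod_cast hrow)
      exact ih (by omega) _ hl2 (fun k hk1 hk2 => by exact_mod_cast hr2 k (by omega) hk2) j hj

-- ===== VERDICT (by name: the statement is the Claim_ definition above) =====
theorem predictTheWinnerMemo_spec : Claim_equal_predictTheWinnerMemo := by
  intro nums _
  show predictTheWinnerMemo nums = predictTheWinnerMemo_alt nums
  by_cases hnil : nums = []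
  · subst hnil; rfl
  · have hn0 : nums.length ≠ 0 := by simpa using hnil
    rw [predictTheWinnerMemo, predictTheWinnerMemo_alt, if_neg hnil, if_neg hn0]
    have hinv0 : InvA nums PySem.Dict.empty := by
      intro i j v hget _
      rw [PySem.Dict.get?_empty] at hget
      exact absurd hget (by simp)
    have hA := (dfsA_correct nums PySem.Dict.empty 0 ((nums.length : Int) - 1) hinv0).1
    have hrange : List.range nums.length = List.range ((nums.length - 1) + 1) := by
      congr 1; omega
    have hB := outerB nums nums.length rfl (nums.length - 1) (by omega)
      (List.replicate nums.length (0 : Int)) (by simp)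
      (fun k hk1 hk2 => absurd hk2 (by omega))
      (nums.length - 1) (by omega)
    have hcast : ((nums.length - 1 : Nat) : Int) = (nums.length : Int) - 1 := by omega
    rw [hcast] at hB
    rw [hrange]
    simp only [hA, hB]
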